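-- pv_equiv track=rewrite | github.com/ShajahanAI/codewars | python/7 kyu/309.py | solve
-- ===== SOURCE A (Python) =====
-- def solve(st):
--     char_to_data_dict = dict()
--     for char_idx, char in enumerate(st):
--         if char not in char_to_data_dict:
--             data_dict = dict(first_occurence=char_idx, last_occurence=char_idx, value=0)
--             char_to_data_dict[char] = data_dict
--         else:
--             data_dict = char_to_data_dict[char]
--             data_dict["last_occurence"] = char_idx
--             data_dict["value"] = data_dict["last_occurence"] - data_dict["first_occurence"]
--
--     value_to_characters = dict()
--     for char in char_to_data_dict:
--         data_dict = char_to_data_dict[char]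
--         value = data_dict['value']
--         if value not in value_to_characters:
--             value_to_characters[value] = list()
--
--         value_to_characters[value].append(char)
--
--     max_value = max(value_to_characters)
--     max_value_characters = sorted(value_to_characters[max_value])
--     result = max_value_characters[0]
--
--     return result
-- ===== SOURCE B (Python) =====
-- def solve(st):
--     gaps = {c: st.rindex(c) - st.index(c) for c in set(st)}
--     m = max(gaps.values())
--     return min(c for c in gaps if gaps[c] == m)
-- ===== Notes on version B (the rewrite author's own statement) =====
-- stated objective: simpler
-- what changed: Replaces A's one-pass table of per-char first/last/value dicts plus a regrouping dict, max over group keys, sort and [0] by a direct dict comprehension over set(st) computing each gap as st.rindex(c)-st.index(c), then max of the values and min of the max-gap chars.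
import Mathlib
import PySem

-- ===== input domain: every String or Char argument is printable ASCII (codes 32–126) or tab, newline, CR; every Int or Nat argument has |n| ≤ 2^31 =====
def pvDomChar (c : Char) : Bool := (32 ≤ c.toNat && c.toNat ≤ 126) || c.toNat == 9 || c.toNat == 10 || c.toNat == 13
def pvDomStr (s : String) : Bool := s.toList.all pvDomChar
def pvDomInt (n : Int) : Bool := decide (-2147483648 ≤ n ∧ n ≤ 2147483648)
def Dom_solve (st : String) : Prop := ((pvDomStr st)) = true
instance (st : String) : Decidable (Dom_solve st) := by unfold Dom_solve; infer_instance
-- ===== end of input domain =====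

-- B replaces A's first/last/value table and regrouping dict + sort by per-char rindex/index gap
-- computation with a direct max/min selection (objective: simpler; return value only).

-- ===== PORT A =====
-- loop body of A's first loop: char -> dict(first_occurence, last_occurence, value)
def solveStep1 (d : PySem.Dict Char (Int × Int × Int)) (p : Int × Char) :
    PySem.Dict Char (Int × Int × Int) :=
  if ¬ d.contains p.2 then
    d.insert p.2 (p.1, p.1, 0)
  else
    -- the lookup always succeeds here (key is present); getD's default is never used
    let t := (d.get? p.2).getD (0, 0, 0)
    d.insert p.2 (t.1, p.1, p.1 - t.1)

def solve (st : String) : String :=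
  let cs := st.toList
  let d1 : PySem.Dict Char (Int × Int × Int) :=
    (PySem.List.enumerate cs 0).foldl solveStep1 PySem.Dict.empty
  -- second loop: value -> list of chars ('if value not in: []' then append = Dict.modify)
  let d2 : PySem.Dict Int (List Char) :=
    d1.keys.foldl
      (fun d c => d.modify ((d1.get? c).getD (0, 0, 0)).2.2 [] (· ++ [c]))
      PySem.Dict.empty
  match PySem.List.max? d2.keys (fun v => v) with
  | none => ""   -- Python: max() raises ValueError on the empty string; excluded by Pre_solve
  | some m =>
      match PySem.List.sorted (d2.getD m []) (fun c => c) false with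
      | [] => ""   -- unreachable: the group of the max value is nonempty
      | c :: _ => String.ofList [c]

-- ===== PORT B =====
def solve_alt (st : String) : String :=
  let cs := st.toList
  -- gaps = {c: st.rindex(c) - st.index(c) for c in set(st)} (set consumed order-insensitively)
  let gaps : List (Char × Int) :=
    (PySem.Set.ofList cs).map (fun c => (c, PySem.Chars.rfind cs [c] - PySem.Chars.find cs [c]))
  match PySem.List.max? (gaps.map (·.2)) (fun v => v) with
  | none => ""   -- Python: max() raises ValueError on the empty string; excluded by Pre_solve
  | some m =>
      match PySem.List.min? ((gaps.filter (fun p => p.2 == m)).map (·.1)) (fun c => c) with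
      | none => ""   -- unreachable: some char attains the max gap
      | some c => String.ofList [c]

-- ===== PRECONDITION & SPEC =====
-- Pre_ excludes only the empty string, on which A (and B alike) raises ValueError (max of an empty sequence).
def Pre_solve (st : String) : Prop := st ≠ ""
instance (st : String) : Decidable (Pre_solve st) := by unfold Pre_solve; infer_instance
def pvWitness_solve : String := "ab"
def Spec_solve (st : String) (out : String) : Prop := out = solve_alt st
instance (st : String) (out : String) : Decidable (Spec_solve st out) := by unfold Spec_solve; infer_instance

-- ===== CLAIM (what is proved, stated in full; the proofs are below) =====
def Claim_equal_solve : Prop := ∀ (st : String), Dom_solve st → Pre_solve st → Spec_solve st (solve st)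

-- ===== LEMMAS AND PROOFS =====

-- canonical first/last occurrence index (proof-side only)
def fE (cs : List Char) (c : Char) : Int :=
  (PySem.List.enumerate cs 0).foldl (fun a p => if p.2 = c ∧ a = -1 then p.1 else a) (-1)
def lE (cs : List Char) (c : Char) : Int :=
  (PySem.List.enumerate cs 0).foldl (fun a p => if p.2 = c then p.1 else a) (-1)

theorem fE_append (xs : List Char) (x c : Char) :
    fE (xs ++ [x]) c = if x = c ∧ fE xs c = -1 then (xs.length : Int) else fE xs c := by
  simp [fE, PySem.List.enumerate_append, PySem.List.enumerate_cons]

theorem lE_append (xs : List Char) (x c : Char) :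
    lE (xs ++ [x]) c = if x = c then (xs.length : Int) else lE xs c := by
  simp [lE, PySem.List.enumerate_append, PySem.List.enumerate_cons]

theorem fE_neg_of_not_mem (cs : List Char) (c : Char) (h : c ∉ cs) : fE cs c = -1 := by
  induction cs using List.reverseRecOn with
  | nil => simp [fE]
  | append_singleton xs x ih =>
    simp at h
    rw [fE_append, if_neg, ih h.1]
    rintro ⟨rfl, -⟩; exact h.2 rfl

theorem fE_nonneg_of_mem (cs : List Char) (c : Char) (h : c ∈ cs) : 0 ≤ fE cs c := by
  induction cs using List.reverseRecOn with
  | nil => simp at h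
  | append_singleton xs x ih =>
    rw [fE_append]
    split_ifs with hh
    · positivity
    · rcases List.mem_append.1 h with h1 | h1
      · exact ih h1
      · simp at h1; subst h1
        rcases em (c ∈ xs) with hm | hm
        · exact ih hm
        · exact absurd ⟨rfl, fE_neg_of_not_mem xs c hm⟩ hh

theorem fE_eq_idxOf (cs : List Char) (c : Char) (h : c ∈ cs) :
    fE cs c = (cs.idxOf c : Nat) := by
  induction cs using List.reverseRecOn with
  | nil => simp at h
  | append_singleton xs x ih =>
    rw [fE_append, List.idxOf_append]
    rcases em (c ∈ xs) with hm | hm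
    · rw [if_neg, if_pos hm]
      · exact ih hm
      · rintro ⟨hxc, hf⟩
        exact absurd hf (by have := fE_nonneg_of_mem xs c hm; omega)
    · have hx : x = c := by
        rcases List.mem_append.1 h with h1 | h1
        · exact absurd h1 hm
        · simp at h1; exact h1.symm
      rw [if_pos ⟨hx, fE_neg_of_not_mem xs c hm⟩, if_neg hm]
      subst hx
      simp [List.idxOf_eq_length hm]

-- find.go on a singleton pattern
theorem find_go_singleton (c : Char) (cs : List Char) : ∀ k : Nat,
    PySem.Chars.find.go [c] cs k = if c ∈ cs then ((k : Int) + (cs.idxOf c : Nat)) else -1 := by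
  induction cs with
  | nil => intro k; simp [PySem.Chars.find.go]
  | cons a t ih =>
    intro k
    by_cases hac : a = c
    · subst hac
      simp [PySem.Chars.find.go, List.isPrefixOf]
    · have hpre : ([c].isPrefixOf (a :: t)) = false := by
        simp [List.isPrefixOf]; exact fun h => absurd h.symm hac
      simp only [PySem.Chars.find.go, hpre, Bool.false_eq_true, if_false, ih (k+1)]
      by_cases hm : c ∈ t
      · simp [hm, hac, Ne.symm hac]
        ring
      · simp [hm, hac]
        exact fun h => absurd h.symm hac

-- bridge: st.index(c) is the canonical first-occurrence index
theorem find_eq_fE (cs : List Char) (c : Char) : PySem.Chars.find cs [c] = fE cs c := by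
  have hgo := find_go_singleton c cs 0
  rcases em (c ∈ cs) with hm | hm
  · rw [PySem.Chars.find, hgo, if_pos hm, fE_eq_idxOf cs c hm]; ring
  · rw [PySem.Chars.find, hgo, if_neg hm, fE_neg_of_not_mem cs c hm]

theorem singleton_isPrefixOf (c a : Char) (t : List Char) :
    ([c].isPrefixOf (a :: t)) = (c == a) := by
  simp [List.isPrefixOf]

theorem rfind_go_append_of_ne (xs : List Char) (x c : Char) (hne : c ≠ x) :
    ∀ n, n ≤ xs.length →
      PySem.Chars.rfind.go (xs ++ [x]) [c] n = PySem.Chars.rfind.go xs [c] n := by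
  intro n
  induction n with
  | zero =>
    intro _
    cases xs with
    | nil => simp [PySem.Chars.rfind.go, singleton_isPrefixOf, hne]
    | cons a t => simp [PySem.Chars.rfind.go, singleton_isPrefixOf]
  | succ j ih =>
    intro hle
    have hj : j ≤ xs.length := Nat.le_of_succ_le hle
    have hdrop : List.drop (j+1) (xs ++ [x])
        = List.drop (j+1) xs ++ (if j+1 ≤ xs.length then [x] else []) := by
      simp [List.drop_append, hle]
    by_cases heq : j + 1 = xs.length
    · have h1 : List.drop (j+1) xs = [] := by simp [heq]
      have h2 : List.drop (j+1) (xs ++ [x]) = [x] := by simp [hdrop, h1, hle]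
      simp [PySem.Chars.rfind.go, h1, h2, singleton_isPrefixOf, hne, ih hj]
    · have hlt : j + 1 < xs.length := lt_of_le_of_ne hle heq
      obtain ⟨a, t, hat⟩ : ∃ a t, List.drop (j+1) xs = a :: t := by
        cases hd : List.drop (j+1) xs with
        | nil => exact absurd (List.drop_eq_nil_iff.1 hd) (by omega)
        | cons a t => exact ⟨a, t, rfl⟩
      have h2 : List.drop (j+1) (xs ++ [x]) = a :: (t ++ [x]) := by simp [hdrop, hat, hle]
      simp [PySem.Chars.rfind.go, hat, h2, singleton_isPrefixOf, ih hj]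

theorem rfind_append_self (xs : List Char) (x : Char) :
    PySem.Chars.rfind (xs ++ [x]) [x] = (xs.length : Int) := by
  have hlen : (xs ++ [x]).length = xs.length + 1 := by simp
  have h1 : List.drop (xs.length + 1) (xs ++ [x]) = [] := by simp
  have h2 : List.drop xs.length (xs ++ [x]) = [x] := by simp [List.drop_append]
  simp only [PySem.Chars.rfind, hlen]
  rw [show PySem.Chars.rfind.go (xs ++ [x]) [x] (xs.length + 1)
      = PySem.Chars.rfind.go (xs ++ [x]) [x] xs.length from by
    simp [PySem.Chars.rfind.go, h1]]
  cases hn : xs.length with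
  | zero =>
    have hx : xs = [] := List.eq_nil_of_length_eq_zero hn
    subst hx; simp [PySem.Chars.rfind.go, singleton_isPrefixOf]
  | succ j =>
    have h2' : List.drop (j+1) (xs ++ [x]) = [x] := by rw [← hn]; exact h2
    simp [PySem.Chars.rfind.go, h2', singleton_isPrefixOf, hn]

theorem rfind_append_of_ne (xs : List Char) (x c : Char) (hne : c ≠ x) :
    PySem.Chars.rfind (xs ++ [x]) [c] = PySem.Chars.rfind xs [c] := by
  have hlen : (xs ++ [x]).length = xs.length + 1 := by simp
  have h1 : List.drop (xs.length + 1) (xs ++ [x]) = [] := by simp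
  simp only [PySem.Chars.rfind, hlen]
  rw [show PySem.Chars.rfind.go (xs ++ [x]) [c] (xs.length + 1)
      = PySem.Chars.rfind.go (xs ++ [x]) [c] xs.length from by
    simp [PySem.Chars.rfind.go, h1]]
  exact rfind_go_append_of_ne xs x c hne xs.length le_rfl

-- bridge: st.rindex(c) is the canonical last-occurrence index
theorem rfind_eq_lE (cs : List Char) (c : Char) : PySem.Chars.rfind cs [c] = lE cs c := by
  induction cs using List.reverseRecOn with
  | nil => simp [PySem.Chars.rfind, PySem.Chars.rfind.go, lE]
  | append_singleton xs x ih =>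
    rw [lE_append]
    rcases em (x = c) with rfl | hne
    · rw [if_pos rfl, rfind_append_self]
    · rw [if_neg hne, rfind_append_of_ne xs x c (Ne.symm hne), ih]

-- A's first loop in closed form
theorem dedup_append_singleton (xs : List Char) (x : Char) :
    PySem.List.dedup (xs ++ [x])
      = if x ∈ xs then PySem.List.dedup xs else PySem.List.dedup xs ++ [x] := by
  have h : PySem.List.dedup (xs ++ [x]) = PySem.Set.add (PySem.List.dedup xs) x := by
    simp [PySem.List.dedup_eq_ofList, PySem.Set.ofList_eq_foldl, List.foldl_append]
  rw [h, PySem.Set.add]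
  by_cases hm : x ∈ xs
  · rw [if_pos, if_pos hm]
    simp only [PySem.Set.contains, List.contains_iff_mem, PySem.List.dedup_eq_ofList]
    exact (PySem.Set.mem_ofList xs x).2 hm
  · rw [if_neg, if_neg hm]
    simp only [PySem.Set.contains, List.contains_iff_mem, PySem.List.dedup_eq_ofList]
    exact fun hh => hm ((PySem.Set.mem_ofList xs x).1 hh)

theorem phase1_items (cs : List Char) :
    (PySem.List.enumerate cs 0).foldl solveStep1 PySem.Dict.empty
      = PySem.Dict.mk ((PySem.List.dedup cs).map
          (fun c => (c, (fE cs c, lE cs c, lE cs c - fE cs c)))) := by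
  induction cs using List.reverseRecOn with
  | nil => rfl
  | append_singleton xs x ih =>
    have henum : PySem.List.enumerate (xs ++ [x]) 0
        = PySem.List.enumerate xs 0 ++ [((xs.length : Int), x)] := by
      simp [PySem.List.enumerate_append, PySem.List.enumerate_cons]
    rw [henum, List.foldl_append, ih]
    have hkeysmk : (PySem.Dict.mk ((PySem.List.dedup xs).map
        (fun c => (c, (fE xs c, lE xs c, lE xs c - fE xs c))))).keys = PySem.List.dedup xs := by
      simp [PySem.Dict.keys, List.map_map, Function.comp_def]
    by_cases hm : x ∈ xs
    · -- update branch
      have hcont : (PySem.Dict.mk ((PySem.List.dedup xs).map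
          (fun c => (c, (fE xs c, lE xs c, lE xs c - fE xs c))))).contains x = true := by
        rw [PySem.Dict.contains_iff_mem_keys, hkeysmk]
        exact (PySem.List.mem_dedup _ _).2 hm
      have hget : (PySem.Dict.mk ((PySem.List.dedup xs).map
          (fun c => (c, (fE xs c, lE xs c, lE xs c - fE xs c))))).get? x
          = some (fE xs x, lE xs x, lE xs x - fE xs x) := by
        apply PySem.Dict.get?_of_mem_items
        · exact List.mem_map_of_mem ((PySem.List.mem_dedup _ _).2 hm)
        · rw [hkeysmk]; exact PySem.List.nodup_dedup xs
      simp only [List.foldl_cons, List.foldl_nil, solveStep1, hcont, eq_self_iff_true,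
        not_true, if_false, hget, Option.getD_some]
      apply PySem.Dict.ext
      rw [PySem.Dict.items_insert_of_contains _ _ hcont]
      simp only [PySem.Dict.items]
      rw [dedup_append_singleton, if_pos hm, List.map_map]
      apply List.map_congr_left
      intro c hc
      have hcx : c ∈ xs := (PySem.List.mem_dedup _ _).1 hc
      by_cases hcxx : c = x
      · subst hcxx
        have h1 : fE (xs ++ [c]) c = fE xs c := by
          rw [fE_append, if_neg]
          rintro ⟨-, hf⟩
          exact absurd hf (by have := fE_nonneg_of_mem xs c hcx; omega)
        have h2 : lE (xs ++ [c]) c = (xs.length : Int) := by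
          rw [lE_append, if_pos rfl]
        simp [h1, h2]
      · have h1 : fE (xs ++ [x]) c = fE xs c := by
          rw [fE_append, if_neg]; rintro ⟨hxc, -⟩; exact hcxx hxc.symm
        have h2 : lE (xs ++ [x]) c = lE xs c := by
          rw [lE_append, if_neg (fun hxc => hcxx hxc.symm)]
        simp [h1, h2, hcxx]
    · -- fresh-key branch
      have hcont : (PySem.Dict.mk ((PySem.List.dedup xs).map
          (fun c => (c, (fE xs c, lE xs c, lE xs c - fE xs c))))).contains x = false := by
        rw [← Bool.not_eq_true, PySem.Dict.contains_iff_mem_keys, hkeysmk]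
        exact fun h => hm ((PySem.List.mem_dedup _ _).1 h)
      simp only [List.foldl_cons, List.foldl_nil, solveStep1, hcont, Bool.false_eq_true,
        not_false_iff, if_true]
      apply PySem.Dict.ext
      rw [PySem.Dict.items_insert_of_not_contains _ _ hcont]
      simp only [PySem.Dict.items]
      rw [dedup_append_singleton, if_neg hm, List.map_append]
      congr 1
      · apply List.map_congr_left
        intro c hc
        have hcx : c ∈ xs := (PySem.List.mem_dedup _ _).1 hc
        have hcxx : c ≠ x := fun h => hm (h ▸ hcx)
        have h1 : fE (xs ++ [x]) c = fE xs c := by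
          rw [fE_append, if_neg]; rintro ⟨hxc, -⟩; exact hcxx hxc.symm
        have h2 : lE (xs ++ [x]) c = lE xs c := by
          rw [lE_append, if_neg (fun hxc => hcxx hxc.symm)]
        simp [h1, h2]
      · have h1 : fE (xs ++ [x]) x = (xs.length : Int) := by
          rw [fE_append, if_pos ⟨rfl, fE_neg_of_not_mem xs x hm⟩]
        have h2 : lE (xs ++ [x]) x = (xs.length : Int) := by
          rw [lE_append, if_pos rfl]
        simp [h1, h2]


-- gap of a character (proof-side)
def gC (cs : List Char) (c : Char) : Int := lE cs c - fE cs c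

theorem grp_keys (cs : List Char) :
    ((PySem.List.dedup cs).foldl
        (fun d c => d.modify (gC cs c) [] (· ++ [c])) PySem.Dict.empty).keys
      = PySem.Set.ofList ((PySem.List.dedup cs).map (gC cs)) := by
  rw [PySem.Dict.keys_foldl_modify_key (PySem.List.dedup cs) (gC cs) []
      (fun _ c zs => zs ++ [c]) PySem.Dict.empty]
  simp [PySem.Set.update, PySem.Set.ofList_eq_foldl, PySem.Dict.keys_empty]

theorem grp_getD (cs : List Char) (m : Int) :
    ((PySem.List.dedup cs).foldl
        (fun d c => d.modify (gC cs c) [] (· ++ [c])) PySem.Dict.empty).getD m []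
      = (PySem.List.dedup cs).filter (fun c => gC cs c == m) := by
  have h1 : (PySem.List.dedup cs).foldl
        (fun d c => d.modify (gC cs c) [] (· ++ [c])) PySem.Dict.empty
      = ((PySem.List.dedup cs).map (fun c => (gC cs c, c))).foldl
        (fun d p => d.modify p.1 [] (· ++ [p.2])) PySem.Dict.empty := by
    rw [List.foldl_map]
  rw [h1, PySem.Dict.getD_foldl_modify_append]
  simp [List.filter_map, Function.comp_def]

-- the maximum value is determined by membership alone
theorem max?_id_eq_of_mem_iff (xs ys : List Int)
    (h : ∀ v : Int, v ∈ xs ↔ v ∈ ys) {a b : Int}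
    (ha : PySem.List.max? xs (fun v => v) = some a)
    (hb : PySem.List.max? ys (fun v => v) = some b) : a = b := by
  have hma := PySem.List.max?_mem ha
  have hmb := PySem.List.max?_mem hb
  have h1 : a ≤ b := PySem.List.max?_isMax hb a ((h a).1 hma)
  have h2 : b ≤ a := PySem.List.max?_isMax ha b ((h b).2 hmb)
  omega

-- head of sorted = min? (as values) on any nonempty char list
theorem head_sorted_eq_min? (l : List Char) {c : Char} {t : List Char} {c' : Char}
    (hs : PySem.List.sorted l (fun x => x) false = c :: t)
    (hm : PySem.List.min? l (fun x => x) = some c') : c = c' := by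
  have hc : c ∈ l := by
    have : c ∈ PySem.List.sorted l (fun x => x) false := by rw [hs]; exact List.mem_cons_self
    exact (PySem.List.mem_sorted l _ false c).1 this
  have h1 : c ≤ c' := PySem.List.key_head_sorted_le l (fun x => x) hs c' (PySem.List.min?_mem hm)
  have h2 : c' ≤ c := PySem.List.min?_isMin hm c hc
  exact le_antisymm h1 h2

theorem toList_ne_nil (st : String) (h : st ≠ "") : st.toList ≠ [] := by
  intro hh
  exact h (by simpa using congrArg String.ofList hh)

-- the two ports agree on every nonempty string
theorem solve_eq_solve_alt (st : String) (hne : st.toList ≠ []) : solve st = solve_alt st := by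
  simp only [solve, solve_alt]
  rw [phase1_items st.toList]
  set cs := st.toList with hcs
  -- abbreviations
  have hkeysmk : (PySem.Dict.mk ((PySem.List.dedup cs).map
      (fun c => (c, (fE cs c, lE cs c, lE cs c - fE cs c))))).keys = PySem.List.dedup cs := by
    simp [PySem.Dict.keys, List.map_map, Function.comp_def]
  -- rewrite A's second loop body into canonical form
  have hbody : (PySem.List.dedup cs).foldl
      (fun d c => d.modify (((PySem.Dict.mk ((PySem.List.dedup cs).map
          (fun c => (c, (fE cs c, lE cs c, lE cs c - fE cs c))))).get? c).getD (0,0,0)).2.2 []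
        (· ++ [c])) PySem.Dict.empty
      = (PySem.List.dedup cs).foldl
        (fun d c => d.modify (gC cs c) [] (· ++ [c])) PySem.Dict.empty := by
    apply PySem.List.foldl_congr_mem
    intro acc c hc
    have hget : (PySem.Dict.mk ((PySem.List.dedup cs).map
        (fun c => (c, (fE cs c, lE cs c, lE cs c - fE cs c))))).get? c
        = some (fE cs c, lE cs c, lE cs c - fE cs c) := by
      apply PySem.Dict.get?_of_mem_items
      · exact List.mem_map_of_mem hc
      · rw [hkeysmk]; exact PySem.List.nodup_dedup cs
    rw [hget]
    rfl
  rw [hkeysmk, hbody]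
  -- rewrite B's gaps into canonical form
  have hgaps : (PySem.Set.ofList cs).map
      (fun c => (c, PySem.Chars.rfind cs [c] - PySem.Chars.find cs [c]))
      = (PySem.List.dedup cs).map (fun c => (c, gC cs c)) := by
    rw [← PySem.List.dedup_eq_ofList]
    apply List.map_congr_left
    intro c _
    rw [rfind_eq_lE, find_eq_fE]
    rfl
  rw [hgaps]
  have hvalsB : ((PySem.List.dedup cs).map (fun c => (c, gC cs c))).map (fun p => p.2)
      = (PySem.List.dedup cs).map (gC cs) := by
    rw [List.map_map]; rfl
  rw [hvalsB, grp_keys]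
  -- nonemptiness
  have hded : PySem.List.dedup cs ≠ [] := by
    cases hcc : cs with
    | nil => exact absurd hcc hne
    | cons a t =>
      intro hdd
      have hmem2 : a ∈ PySem.List.dedup cs := (PySem.List.mem_dedup cs a).2 (by rw [hcc]; exact List.mem_cons_self)
      rw [hcc, hdd] at hmem2; simp at hmem2
  have hvals : (PySem.List.dedup cs).map (gC cs) ≠ [] := by
    simpa using hded
  have hS : PySem.Set.ofList ((PySem.List.dedup cs).map (gC cs)) ≠ [] := by
    obtain ⟨v, hv⟩ := List.exists_mem_of_ne_nil _ hvals
    exact List.ne_nil_of_mem ((PySem.Set.mem_ofList _ v).2 hv)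
  -- case on the two max?
  cases hmA : PySem.List.max? (PySem.Set.ofList ((PySem.List.dedup cs).map (gC cs))) (fun v => v) with
  | none => exact absurd ((PySem.List.max?_eq_none_iff _ _).1 hmA) hS
  | some mA =>
  cases hmB : PySem.List.max? ((PySem.List.dedup cs).map (gC cs)) (fun v => v) with
  | none => exact absurd ((PySem.List.max?_eq_none_iff _ _).1 hmB) hvals
  | some mB =>
  have hmAB : mA = mB := by
    apply max?_id_eq_of_mem_iff _ _ _ hmA hmB
    intro v; exact PySem.Set.mem_ofList _ v
  subst hmAB
  dsimp only
  -- both select from the same char list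
  have hfB : ((((PySem.List.dedup cs).map (fun c => (c, gC cs c))).filter
        (fun p => p.2 == mA)).map (fun p => p.1))
      = (PySem.List.dedup cs).filter (fun c => gC cs c == mA) := by
    rw [List.filter_map, List.map_map]
    simp [Function.comp_def]
  rw [hfB, grp_getD]
  -- the selected list is nonempty
  have hmem : mA ∈ (PySem.List.dedup cs).map (gC cs) := PySem.List.max?_mem hmB
  obtain ⟨c0, hc0, hgc0⟩ := List.mem_map.1 hmem
  have hfilter : (PySem.List.dedup cs).filter (fun c => gC cs c == mA) ≠ [] := by
    apply List.ne_nil_of_mem (a := c0)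
    rw [List.mem_filter]
    exact ⟨hc0, by simp [hgc0]⟩
  cases hsort : PySem.List.sorted ((PySem.List.dedup cs).filter (fun c => gC cs c == mA))
      (fun c => c) false with
  | nil => exact absurd ((PySem.List.sorted_eq_nil_iff _ _ _).1 hsort) hfilter
  | cons chead ctail =>
  cases hmin : PySem.List.min? ((PySem.List.dedup cs).filter (fun c => gC cs c == mA))
      (fun c => c) with
  | none => exact absurd ((PySem.List.min?_eq_none_iff _ _).1 hmin) hfilter
  | some cmin =>
  rw [head_sorted_eq_min? _ hsort hmin]

-- ===== VERDICT (by name: the statement is the Claim_ definition above) =====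
theorem solve_spec : Claim_equal_solve := by
  intro st _ hpre
  unfold Spec_solve
  exact solve_eq_solve_alt st (toList_ne_nil st hpre)
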